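-- pv_equiv track=rewrite | github.com/PineTreeLabs/lynx | src/lynx/conversion/graph_pruning.py | _dfs_backward
-- ===== SOURCE A (Python) =====
-- from typing import TYPE_CHECKING, Dict, List, Set
--
-- def _dfs_backward(backward_edges: Dict[str, List[str]], start_block_id: str, visited: Set[str]) -> Set[str]:
--     """Backward DFS: find all blocks that can reach start block.
--
--     Args:
--         backward_edges: Adjacency list for backward traversal
--         start_block_id: Starting block ID
--         visited: Set of already visited block IDs (for cycle detection)
--
--     Returns:
--         Set of block IDs that can reach start block
--     """
--     if start_block_id in visited:
--         return set()  # Cycle detected, terminate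
--
--     visited.add(start_block_id)
--     reachable = {start_block_id}
--
--     for source_id in backward_edges.get(start_block_id, []):
--         reachable |= _dfs_backward(backward_edges, source_id, visited)
--
--     return reachable
-- ===== SOURCE B (Python) =====
-- def _dfs_backward(backward_edges, start_block_id, visited):
--     """Backward DFS, iteratively: explicit stack instead of recursion and set unions."""
--     reachable = set()
--     stack = [start_block_id]
--     while stack:
--         node = stack.pop()
--         if node in visited:
--             continue
--         visited.add(node)
--         reachable.add(node)
--         stack.extend(reversed(backward_edges.get(node, [])))
--     return reachable
-- ===== Notes on version B (the rewrite author's own statement) =====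
-- stated objective: alternative
-- what changed: Replaced A's recursive DFS that unions the result sets of recursive calls by an iterative DFS over an explicit stack that accumulates the reachable set directly in one loop.
import Mathlib
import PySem

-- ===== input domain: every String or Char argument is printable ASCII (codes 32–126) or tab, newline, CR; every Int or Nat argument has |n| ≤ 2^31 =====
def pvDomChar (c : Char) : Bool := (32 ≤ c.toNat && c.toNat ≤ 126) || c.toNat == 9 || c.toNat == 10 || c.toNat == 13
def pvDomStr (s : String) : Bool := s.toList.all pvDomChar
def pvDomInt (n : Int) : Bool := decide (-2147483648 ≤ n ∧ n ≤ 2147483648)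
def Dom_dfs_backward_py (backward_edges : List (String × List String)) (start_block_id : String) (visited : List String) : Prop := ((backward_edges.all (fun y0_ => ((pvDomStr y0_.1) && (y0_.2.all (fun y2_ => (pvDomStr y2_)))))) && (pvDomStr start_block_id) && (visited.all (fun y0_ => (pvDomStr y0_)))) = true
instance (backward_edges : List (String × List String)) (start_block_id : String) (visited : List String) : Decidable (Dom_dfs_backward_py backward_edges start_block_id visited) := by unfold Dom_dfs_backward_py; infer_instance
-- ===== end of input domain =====

-- B replaces A's recursive DFS (recursion + set unions) by an iterative DFS over an explicit
-- stack that accumulates the reachable set directly (objective: alternative decomposition).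
-- Both A and B mutate the Python argument `visited` identically (they add exactly the newly
-- reached block ids); the equivalence proved here is about the RETURN value.

-- all block ids occurring in the edge dict (keys and values); used only to seed the fuel
def pvNodes (E : List (String × List String)) : List String :=
  E.flatMap (fun p => p.1 :: p.2)

-- ===== PORT A =====
-- `backward_edges.get(s, [])`
def pvChildren (E : List (String × List String)) (s : String) : List String :=
  (PySem.Dict.mk E).getD s []

mutual
-- the recursive DFS of A; the Nat argument is a fuel guard for totality only
-- (never exhausted at the seeded fuel: see lemma pvA_eq_visit below)
def pvA_dfs (E : List (String × List String)) : Nat → String → PySem.Set String → PySem.Set String × PySem.Set String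
  | 0, _, v => (v, [])
  | n+1, s, v =>
    if PySem.Set.contains v s then (v, [])        -- cycle detected, return set()
    else pvA_go E n (pvChildren E s) (PySem.Set.add v s) [s]
  termination_by n _ _ => (n, 0)

-- the `for source_id in …: reachable |= _dfs_backward(…)` loop of A
def pvA_go (E : List (String × List String)) : Nat → List String → PySem.Set String → PySem.Set String → PySem.Set String × PySem.Set String
  | _, [], v, r => (v, r)
  | n, c :: cs, v, r =>
    let p := pvA_dfs E n c v
    pvA_go E n cs p.1 (PySem.Set.union r p.2)
  termination_by n cs _ _ => (n, cs.length + 1)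
end

def dfs_backward_py (backward_edges : List (String × List String)) (start_block_id : String) (visited : List String) : List String :=
  (pvA_dfs backward_edges ((pvNodes backward_edges).length + 1) start_block_id visited).2

-- ===== PORT B =====
-- the while-loop of B: pop from the stack, skip if visited, else mark and push the sources
def pvB_loop (E : List (String × List String)) : Nat → PySem.Set String → PySem.Set String → List String → PySem.Set String
  | 0, _, r, _ => r
  | _+1, _, r, [] => r
  | n+1, v, r, x :: st =>
    if PySem.Set.contains v x then pvB_loop E n v r st
    else pvB_loop E n (PySem.Set.add v x) (PySem.Set.add r x) (pvChildren E x ++ st)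

def dfs_backward_py_alt (backward_edges : List (String × List String)) (start_block_id : String) (visited : List String) : List String :=
  let N := (pvNodes backward_edges).length
  pvB_loop backward_edges (N * N + 2 * N + 2) visited [] [start_block_id]

-- ===== PRECONDITION & SPEC =====
def Spec_dfs_backward_py (backward_edges : List (String × List String)) (start_block_id : String) (visited : List String) (out : List String) : Prop := out = dfs_backward_py_alt backward_edges start_block_id visited
instance (backward_edges : List (String × List String)) (start_block_id : String) (visited : List String) (out : List String) : Decidable (Spec_dfs_backward_py backward_edges start_block_id visited out) := by unfold Spec_dfs_backward_py; infer_instance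

-- ===== CLAIM (what is proved, stated in full; the proofs are below) =====
def Claim_equal_dfs_backward_py : Prop := ∀ (backward_edges : List (String × List String)) (start_block_id : String) (visited : List String), Dom_dfs_backward_py backward_edges start_block_id visited → Spec_dfs_backward_py backward_edges start_block_id visited (dfs_backward_py backward_edges start_block_id visited)

-- ===== LEMMAS AND PROOFS =====

-- number of not-yet-visited node occurrences; the termination measure of the canonical DFS
def pvMu (E : List (String × List String)) (v : PySem.Set String) : Nat :=
  ((pvNodes E).filter (fun x => !(PySem.Set.contains v x))).length

lemma pvChildren_subset {E : List (String × List String)} {s c : String}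
    (h : c ∈ pvChildren E s) : c ∈ pvNodes E := by
  unfold pvChildren PySem.Dict.getD PySem.Dict.get? at h
  cases hf : List.find? (fun p => p.1 == s) E with
  | none => simp [hf] at h
  | some pr =>
    have hpr : pr ∈ E := List.mem_of_find?_eq_some hf
    simp [hf] at h
    exact List.mem_flatMap.2 ⟨pr, hpr, by simp [h]⟩

lemma pvChildren_nil {E : List (String × List String)} {s : String}
    (h : s ∉ pvNodes E) : pvChildren E s = [] := by
  unfold pvChildren PySem.Dict.getD PySem.Dict.get?
  have : List.find? (fun p => p.1 == s) E = none := by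
    refine List.find?_eq_none.2 (fun p hp => ?_)
    simp only [beq_iff_eq]
    intro hps
    exact h (List.mem_flatMap.2 ⟨p, hp, by simp [hps]⟩)
  simp [this]


lemma pvNotContains_mono {v v' : PySem.Set String} (h : ∀ y, y ∈ v → y ∈ v') :
    ∀ a : String, (!(PySem.Set.contains v' a)) = true → (!(PySem.Set.contains v a)) = true := by
  intro a ha
  rw [Bool.not_eq_true'] at ha ⊢
  cases hcv : PySem.Set.contains v a with
  | false => rfl
  | true =>
    have h1 : PySem.Set.contains v' a = true :=
      (PySem.Set.contains_iff _ a).2 (h a ((PySem.Set.contains_iff v a).1 hcv))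
    rw [h1] at ha
    exact Bool.noConfusion ha

lemma pvMem_add_self (v : PySem.Set String) (x : String) : x ∈ PySem.Set.add v x :=
  (PySem.Set.mem_add v x x).2 (Or.inr rfl)

lemma pvMem_add_of_mem {v : PySem.Set String} {y : String} (x : String) (h : y ∈ v) :
    y ∈ PySem.Set.add v x :=
  (PySem.Set.mem_add v x y).2 (Or.inl h)

lemma pvMu_add_lt {E : List (String × List String)} {v : PySem.Set String} {x : String}
    (hx : x ∈ pvNodes E) (hv : x ∉ v) :
    pvMu E (PySem.Set.add v x) < pvMu E v := by
  have hsub : ((pvNodes E).filter (fun y => !(PySem.Set.contains (PySem.Set.add v x) y))).Sublist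
      ((pvNodes E).filter (fun y => !(PySem.Set.contains v y))) :=
    List.monotone_filter_right _ (pvNotContains_mono (fun y hy => pvMem_add_of_mem x hy))
  refine Nat.lt_of_le_of_ne (hsub.length_le) (fun heq => ?_)
  have heql := hsub.eq_of_length heq
  have hx1 : x ∈ (pvNodes E).filter (fun y => !(PySem.Set.contains v y)) := by
    refine List.mem_filter.2 ⟨hx, ?_⟩
    rw [Bool.not_eq_true']
    cases hc : PySem.Set.contains v x with
    | false => rfl
    | true => exact absurd ((PySem.Set.contains_iff v x).1 hc) hv
  rw [← heql] at hx1
  have h2 := (List.mem_filter.1 hx1).2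
  rw [Bool.not_eq_true'] at h2
  rw [(PySem.Set.contains_iff _ x).2 (pvMem_add_self v x)] at h2
  exact Bool.noConfusion h2

lemma pvMu_antitone {E : List (String × List String)} {v v' : PySem.Set String}
    (h : ∀ y, y ∈ v → y ∈ v') : pvMu E v' ≤ pvMu E v := by
  apply List.Sublist.length_le
  exact List.monotone_filter_right _ (pvNotContains_mono h)

lemma pvMu_add_eq {E : List (String × List String)} {v : PySem.Set String} {x : String}
    (hx : x ∉ pvNodes E) : pvMu E (PySem.Set.add v x) = pvMu E v := by
  unfold pvMu
  congr 1
  apply List.filter_congr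
  intro a ha
  congr 1
  cases hc : PySem.Set.contains v a with
  | true =>
    have : a ∈ PySem.Set.add v x := (PySem.Set.mem_add v x a).2 (Or.inl ((PySem.Set.contains_iff v a).1 hc))
    rw [← PySem.Set.contains_iff] at this
    exact this
  | false =>
    cases hc2 : PySem.Set.contains (PySem.Set.add v x) a with
    | false => rfl
    | true =>
      exfalso
      have := (PySem.Set.contains_iff _ a).1 hc2
      rcases (PySem.Set.mem_add v x a).1 this with h1 | h1
      · rw [← PySem.Set.contains_iff] at h1; rw [h1] at hc; exact Bool.noConfusion hc
      · exact hx (h1 ▸ ha)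

-- the canonical (fuel-free) stack DFS both ports compute
def pvVisit (E : List (String × List String)) : PySem.Set String → List String → PySem.Set String × List String
  | v, [] => (v, [])
  | v, x :: st =>
    if h : PySem.Set.contains v x then pvVisit E v st
    else
      let p := pvVisit E (PySem.Set.add v x) (pvChildren E x ++ st)
      (p.1, x :: p.2)
  termination_by v stack => (pvMu E v, stack.length)
  decreasing_by
  · exact Prod.Lex.right _ (Nat.lt_succ_self _)
  · by_cases hx : x ∈ pvNodes E
    · exact Prod.Lex.left _ _ (pvMu_add_lt hx (fun hm => h ((PySem.Set.contains_iff v x).2 hm)))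
    · rw [pvMu_add_eq hx, pvChildren_nil hx]
      exact Prod.Lex.right _ (by simp)

lemma pvVisit_grow {E : List (String × List String)} :
    ∀ (v : PySem.Set String) (st : List String) (y : String), y ∈ v → y ∈ (pvVisit E v st).1 := by
  intro v st
  fun_induction pvVisit E v st with
  | case1 v => intro y h; simpa using h
  | case2 v x st h ih => intro y hy; exact ih y hy
  | case3 v x st h p ih =>
    intro y hy
    exact ih y ((PySem.Set.mem_add v x y).2 (Or.inl hy))

lemma pvVisit_fresh {E : List (String × List String)} :
    ∀ (v : PySem.Set String) (st : List String) (y : String), y ∈ (pvVisit E v st).2 → y ∉ v := by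
  intro v st
  fun_induction pvVisit E v st with
  | case1 v => simp
  | case2 v x st h ih => exact ih
  | case3 v x st h p ih =>
    intro y hy hyv
    simp only at hy
    rcases List.mem_cons.1 hy with rfl | hy2
    · exact h ((PySem.Set.contains_iff v y).2 hyv)
    · exact ih y hy2 ((PySem.Set.mem_add v x y).2 (Or.inl hyv))

lemma pvVisit_sub {E : List (String × List String)} :
    ∀ (v : PySem.Set String) (st : List String) (y : String), y ∈ (pvVisit E v st).2 → y ∈ (pvVisit E v st).1 := by
  intro v st
  fun_induction pvVisit E v st with
  | case1 v => simp
  | case2 v x st h ih => exact ih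
  | case3 v x st h p ih =>
    intro y hy
    simp only at hy ⊢
    rcases List.mem_cons.1 hy with rfl | hy2
    · exact pvVisit_grow _ _ y ((PySem.Set.mem_add v y y).2 (Or.inr rfl))
    · exact ih y hy2

lemma pvVisit_nodup {E : List (String × List String)} :
    ∀ (v : PySem.Set String) (st : List String), ((pvVisit E v st).2).Nodup := by
  intro v st
  fun_induction pvVisit E v st with
  | case1 v => simp
  | case2 v x st h ih => exact ih
  | case3 v x st h p ih =>
    simp only [List.nodup_cons]
    refine ⟨fun hx => ?_, ih⟩
    exact pvVisit_fresh _ _ x hx ((PySem.Set.mem_add v x x).2 (Or.inr rfl))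

lemma pvVisit_append {E : List (String × List String)} :
    ∀ (v : PySem.Set String) (a b : List String),
      pvVisit E v (a ++ b) =
        ((pvVisit E (pvVisit E v a).1 b).1, (pvVisit E v a).2 ++ (pvVisit E (pvVisit E v a).1 b).2) := by
  intro v a b
  induction v, a using pvVisit.induct E with
  | case1 v => simp [pvVisit]
  | case2 v x st h ih =>
    rw [List.cons_append]
    rw [pvVisit, dif_pos h, pvVisit, dif_pos h]
    exact ih
  | case3 v x st h ih =>
    rw [List.cons_append]
    rw [pvVisit, dif_neg h]
    conv_rhs => rw [pvVisit, dif_neg h]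
    simp only [← List.append_assoc]
    rw [ih]
    simp

-- ===== A-side bridge =====
lemma pvA_go_eq (E : List (String × List String)) (n : Nat)
    (IH : ∀ (s : String) (v : PySem.Set String), s ∈ pvNodes E → pvMu E v ≤ n →
      pvA_dfs E n s v = ((pvVisit E v [s]).1, (pvVisit E v [s]).2)) :
    ∀ (cs : List String) (v r : PySem.Set String),
      (∀ c ∈ cs, c ∈ pvNodes E) → pvMu E v ≤ n → (∀ y ∈ r, y ∈ v) →
      pvA_go E n cs v r = ((pvVisit E v cs).1, r ++ (pvVisit E v cs).2) := by
  intro cs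
  induction cs with
  | nil => intro v r _ _ _; simp [pvA_go, pvVisit]
  | cons c cs ihcs =>
    intro v r hcs hmu hr
    rw [pvA_go]
    rw [IH c v (hcs c (by simp)) hmu]
    have hv1 := pvVisit_grow (E := E) v [c]
    have hfr := pvVisit_fresh (E := E) v [c]
    have hnd := pvVisit_nodup (E := E) v [c]
    have hsub := pvVisit_sub (E := E) v [c]
    -- reachable |= sub  becomes append (disjoint, nodup)
    have hun : PySem.Set.union r (pvVisit E v [c]).2 = r ++ (pvVisit E v [c]).2 := by
      unfold PySem.Set.union
      exact PySem.Set.update_eq_append_of_disjoint r _ hnd (fun y hy hyr => hfr y hy (hr y hyr))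
    simp only [hun]
    rw [ihcs (pvVisit E v [c]).1 (r ++ (pvVisit E v [c]).2)
      (fun d hd => hcs d (by simp [hd]))
      (le_trans (pvMu_antitone hv1) hmu)
      (by intro y hy; rcases List.mem_append.1 hy with h1 | h1
          · exact hv1 y (hr y h1)
          · exact hsub y h1)]
    -- stitch with pvVisit on c :: cs
    by_cases hc : PySem.Set.contains v c
    · have h1 : pvVisit E v [c] = (v, []) := by rw [pvVisit, dif_pos hc, pvVisit]
      conv_rhs => rw [pvVisit, dif_pos hc]
      rw [h1]
      simp
    · have h1 : pvVisit E v [c] =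
          ((pvVisit E (PySem.Set.add v c) (pvChildren E c)).1,
            c :: (pvVisit E (PySem.Set.add v c) (pvChildren E c)).2) := by
        rw [pvVisit, dif_neg hc]
        simp
      conv_rhs => rw [pvVisit, dif_neg hc]
      rw [pvVisit_append (E := E) (PySem.Set.add v c) (pvChildren E c) cs]
      simp [h1]

lemma pvA_dfs_eq (E : List (String × List String)) :
    ∀ (f : Nat) (s : String) (v : PySem.Set String),
      (s ∈ v ∨ (s ∈ pvNodes E ∧ pvMu E v ≤ f) ∨ pvMu E v < f) →
      pvA_dfs E f s v = ((pvVisit E v [s]).1, (pvVisit E v [s]).2) := by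
  intro f
  induction f using Nat.strong_induction_on with
  | _ f ihf =>
    intro s v hyp
    by_cases hsv : PySem.Set.contains v s
    · have hvis : pvVisit E v [s] = (v, []) := by rw [pvVisit, dif_pos hsv, pvVisit]
      cases f with
      | zero => rw [pvA_dfs, hvis]
      | succ f' => rw [pvA_dfs, if_pos hsv, hvis]
    · have hsv' : s ∉ v := fun hm => hsv ((PySem.Set.contains_iff v s).2 hm)
      have hf1 : 1 ≤ f := by
        rcases hyp with h | ⟨hn, hmu⟩ | hmu
        · exact absurd h hsv'
        · have : 1 ≤ pvMu E v := by
            have : s ∈ (pvNodes E).filter (fun x => !(PySem.Set.contains v x)) :=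
              List.mem_filter.2 ⟨hn, by simpa using hsv'⟩
            have h2 := List.length_pos_of_mem this
            unfold pvMu
            omega
          omega
        · omega
      obtain ⟨f', rfl⟩ : ∃ f', f = f' + 1 := ⟨f - 1, by omega⟩
      rw [pvA_dfs, if_neg hsv]
      have hmuadd : pvMu E (PySem.Set.add v s) ≤ f' := by
        by_cases hn : s ∈ pvNodes E
        · have := pvMu_add_lt hn hsv'
          rcases hyp with h | ⟨_, hmu⟩ | hmu
          · exact absurd h hsv'
          · omega
          · omega
        · rw [pvMu_add_eq hn]
          rcases hyp with h | ⟨hn2, _⟩ | hmu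
          · exact absurd h hsv'
          · exact absurd hn2 hn
          · omega
      rw [pvA_go_eq E f'
        (fun t w ht hw => ihf f' (by omega) t w (Or.inr (Or.inl ⟨ht, hw⟩)))
        (pvChildren E s) (PySem.Set.add v s) [s]
        (fun c hc => pvChildren_subset hc)
        hmuadd
        (by intro y hy; simp at hy; subst hy
            exact pvMem_add_self _ _)]
      conv_rhs => rw [pvVisit, dif_neg hsv]
      simp

-- ===== B-side bridge =====
def pvW (E : List (String × List String)) (x : String) : Nat :=
  1 + (pvChildren E x).length

def pvWeight (E : List (String × List String)) (v : PySem.Set String) : Nat :=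
  ((((pvNodes E).dedup).filter (fun x => !(PySem.Set.contains v x))).map (pvW E)).sum

lemma pvSumFilter_mono {p q : String → Bool} (w : String → Nat)
    (h : ∀ y, p y = true → q y = true) :
    ∀ D : List String, ((D.filter p).map w).sum ≤ ((D.filter q).map w).sum := by
  intro D
  induction D with
  | nil => simp
  | cons d D ih =>
    rw [List.filter_cons, List.filter_cons]
    by_cases hp : p d = true
    · rw [if_pos hp, if_pos (h d hp)]
      simp only [List.map_cons, List.sum_cons]
      omega
    · rw [if_neg hp]
      by_cases hq : q d = true
      · rw [if_pos hq]
        simp only [List.map_cons, List.sum_cons]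
        omega
      · rw [if_neg hq]
        exact ih

lemma pvWeight_add_le (E : List (String × List String)) (v : PySem.Set String) (x : String) :
    pvWeight E (PySem.Set.add v x) ≤ pvWeight E v :=
  pvSumFilter_mono (pvW E) (pvNotContains_mono (fun y hy => pvMem_add_of_mem x hy)) _

lemma pvWeight_add_fresh {E : List (String × List String)} {v : PySem.Set String} {x : String}
    (hx : x ∈ pvNodes E) (hv : x ∉ v) :
    pvWeight E (PySem.Set.add v x) + pvW E x ≤ pvWeight E v := by
  have hxd : x ∈ (pvNodes E).dedup := List.mem_dedup.2 hx
  unfold pvWeight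
  have hnd := List.nodup_dedup (pvNodes E)
  revert hnd hxd
  generalize (pvNodes E).dedup = D
  intro hxd hnd
  induction D with
  | nil => simp at hxd
  | cons d D ih =>
    simp only [List.nodup_cons] at hnd
    rw [List.filter_cons, List.filter_cons]
    rcases List.mem_cons.1 hxd with rfl | hxD
    · -- head is x : dropped on the left, kept on the right
      have hcl : PySem.Set.contains (PySem.Set.add v x) x = true :=
        (PySem.Set.contains_iff _ x).2 (pvMem_add_self v x)
      have hcr : PySem.Set.contains v x = false := by
        cases hc : PySem.Set.contains v x with
        | false => rfl
        | true => exact absurd ((PySem.Set.contains_iff v x).1 hc) hv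
      rw [hcl, hcr]
      simp only [Bool.not_true, Bool.not_false]
      rw [if_neg Bool.false_ne_true, if_pos trivial]
      simp only [List.map_cons, List.sum_cons]
      have hmono := pvSumFilter_mono (p := fun y => !(PySem.Set.contains (PySem.Set.add v x) y))
        (q := fun y => !(PySem.Set.contains v y)) (pvW E)
        (pvNotContains_mono (fun y hy => pvMem_add_of_mem x hy)) D
      omega
    · -- head is not x : kept or dropped on both sides equally
      have hdx : d ≠ x := fun h => hnd.1 (h ▸ hxD)
      have hsame : PySem.Set.contains (PySem.Set.add v x) d = PySem.Set.contains v d := by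
        cases hc : PySem.Set.contains v d with
        | true =>
          rw [PySem.Set.contains_iff]
          exact pvMem_add_of_mem x ((PySem.Set.contains_iff v d).1 hc)
        | false =>
          cases hc2 : PySem.Set.contains (PySem.Set.add v x) d with
          | false => rfl
          | true =>
            exfalso
            rcases (PySem.Set.mem_add v x d).1 ((PySem.Set.contains_iff _ d).1 hc2) with h1 | h1
            · rw [← PySem.Set.contains_iff] at h1; rw [h1] at hc; exact Bool.noConfusion hc
            · exact hdx h1
      have ihx := ih hxD hnd.2
      rw [hsame]
      by_cases hc : PySem.Set.contains v d = true
      · rw [hc]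
        simp only [Bool.not_true]
        rw [if_neg Bool.false_ne_true, if_neg Bool.false_ne_true]
        exact ihx
      · have hc' : PySem.Set.contains v d = false := by
          cases h2 : PySem.Set.contains v d with
          | false => rfl
          | true => exact absurd h2 hc
        rw [hc']
        simp only [Bool.not_false]
        rw [if_pos trivial, if_pos trivial]
        simp only [List.map_cons, List.sum_cons]
        omega

lemma pvB_loop_eq (E : List (String × List String)) :
    ∀ (m : Nat) (v r : PySem.Set String) (stack : List String),
      stack.length + pvWeight E v < m → (∀ y ∈ r, y ∈ v) →
      pvB_loop E m v r stack = r ++ (pvVisit E v stack).2 := by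
  intro m
  induction m with
  | zero => intro v r stack h; omega
  | succ m ih =>
    intro v r stack hm hr
    cases stack with
    | nil => rw [pvB_loop, pvVisit]; simp
    | cons x st =>
      by_cases hx : PySem.Set.contains v x
      · rw [pvB_loop, if_pos hx, pvVisit, dif_pos hx]
        refine ih v r st (by simp at hm ⊢; omega) hr
      · have hxv : x ∉ v := fun h => hx ((PySem.Set.contains_iff v x).2 h)
        rw [pvB_loop, if_neg hx, pvVisit, dif_neg hx]
        have hradd : PySem.Set.add r x = r ++ [x] :=
          PySem.Set.add_of_not_mem (fun h => hxv (hr x h))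
        have hfuel : (pvChildren E x ++ st).length + pvWeight E (PySem.Set.add v x) < m := by
          simp only [List.length_append, List.length_cons] at hm ⊢
          by_cases hn : x ∈ pvNodes E
          · have := pvWeight_add_fresh hn hxv
            unfold pvW at this
            omega
          · rw [pvChildren_nil hn]
            have := pvWeight_add_le E v x
            simp at *
            omega
        rw [ih (PySem.Set.add v x) (PySem.Set.add r x) (pvChildren E x ++ st) hfuel
          (by intro y hy
              rw [hradd] at hy
              rcases List.mem_append.1 hy with h1 | h1
              · exact (PySem.Set.mem_add v x y).2 (Or.inl (hr y h1))
              · simp at h1; subst h1; exact pvMem_add_self _ _)]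
        rw [hradd]
        simp

-- fuel bounds for the two top-level calls
lemma pvMu_le (E : List (String × List String)) (v : PySem.Set String) :
    pvMu E v ≤ (pvNodes E).length :=
  List.Sublist.length_le List.filter_sublist

lemma pvChildren_length_le (E : List (String × List String)) (x : String) :
    (pvChildren E x).length ≤ (pvNodes E).length := by
  unfold pvChildren PySem.Dict.getD PySem.Dict.get?
  cases hf : List.find? (fun p => p.1 == x) E with
  | none => simp
  | some pr =>
    simp only [Option.map_some, Option.getD_some]
    have hpr : pr ∈ E := List.mem_of_find?_eq_some hf
    clear hf
    unfold pvNodes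
    induction E with
    | nil => simp at hpr
    | cons e E ih =>
      rw [List.flatMap_cons, List.length_append]
      rcases List.mem_cons.1 hpr with rfl | h2
      · simp only [List.length_cons]
        omega
      · have := ih h2
        omega

lemma pvWeight_le (E : List (String × List String)) (v : PySem.Set String) :
    pvWeight E v ≤ (pvNodes E).length * ((pvNodes E).length + 1) := by
  unfold pvWeight
  have h1 : ∀ y ∈ (((pvNodes E).dedup).filter (fun x => !(PySem.Set.contains v x))).map (pvW E),
      y ≤ (pvNodes E).length + 1 := by
    intro y hy
    rcases List.mem_map.1 hy with ⟨a, _, rfl⟩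
    unfold pvW
    have := pvChildren_length_le E a
    omega
  have h2 := List.sum_le_card_nsmul _ _ h1
  have h3 : (((pvNodes E).dedup).filter (fun x => !(PySem.Set.contains v x))).length ≤ (pvNodes E).length :=
    (List.filter_sublist.trans (List.dedup_sublist _)).length_le
  simp only [List.length_map, smul_eq_mul] at h2
  exact le_trans h2 (Nat.mul_le_mul_right _ h3)

-- ===== VERDICT (by name: the statement is the Claim_ definition above) =====
theorem dfs_backward_py_spec : Claim_equal_dfs_backward_py := by
  intro E s v _
  unfold Spec_dfs_backward_py dfs_backward_py dfs_backward_py_alt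
  rw [pvA_dfs_eq E ((pvNodes E).length + 1) s v
    (Or.inr (Or.inr (Nat.lt_succ_of_le (pvMu_le E v))))]
  rw [pvB_loop_eq E _ v [] [s]
    (by
      have := pvWeight_le E v
      simp only [List.length_cons, List.length_nil]
      nlinarith)
    (by simp)]
  simp
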